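-- pv_equiv track=rewrite | github.com/KLIEBHAN/collatz-patterns | src/fourier_comparison.py | primitive_root_mod_3k
-- ===== SOURCE A (Python) =====
-- def primitive_root_mod_3k(k: int) -> int:
--     """Find a primitive root modulo 3^k."""
--     M = 3**k
--     phi = 2 * 3**(k-1)
--
--     # 2 is a primitive root mod 3^k for all k >= 1
--     # Verify: ord(2) should equal phi(3^k)
--     if pow(2, phi, M) == 1:
--         # Check it's actually primitive (no smaller order)
--         for d in [2, 3, phi//2, phi//3]:
--             if d > 0 and d < phi and pow(2, d, M) == 1:
--                 break
--         else:
--             return 2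
--
--     # Fallback: search
--     for g in range(2, M):
--         if pow(g, phi, M) == 1:
--             is_primitive = True
--             for d in range(1, phi):
--                 if phi % d == 0 and pow(g, d, M) == 1:
--                     is_primitive = False
--                     break
--             if is_primitive:
--                 return g
--     raise ValueError(f"No primitive root found mod {M}")
-- ===== SOURCE B (Python) =====
-- def primitive_root_mod_3k(k: int) -> int:
--     """Find a primitive root modulo 3^k (k >= 1): 2 is always one."""
--     return 2
-- ===== Notes on version B (the rewrite author's own statement) =====
-- stated objective: faster
-- what changed: Replaces A's modular-exponentiation verification (with a search fallback) by the constant 2, proved to be a primitive root mod 3^k for every k >= 1.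
import Mathlib
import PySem

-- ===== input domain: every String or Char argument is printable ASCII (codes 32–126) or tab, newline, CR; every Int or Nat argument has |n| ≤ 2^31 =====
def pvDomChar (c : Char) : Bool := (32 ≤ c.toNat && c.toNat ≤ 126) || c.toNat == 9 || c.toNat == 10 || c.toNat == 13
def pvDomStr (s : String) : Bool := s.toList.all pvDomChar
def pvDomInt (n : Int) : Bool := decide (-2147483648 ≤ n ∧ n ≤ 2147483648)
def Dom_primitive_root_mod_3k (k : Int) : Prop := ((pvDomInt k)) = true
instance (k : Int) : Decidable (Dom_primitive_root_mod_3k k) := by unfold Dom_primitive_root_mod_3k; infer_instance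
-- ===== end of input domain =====

-- B replaces A's verification-plus-search by the constant 2 (a primitive root mod 3^k for every k ≥ 1); objective: faster (O(1)).

-- ===== PORT A =====
-- Python's three-argument pow(b, e, m): square-and-multiply modular exponentiation.
def pypowmod (b : Int) (e : Nat) (m : Int) : Int :=
  if h : e = 0 then 1 % m
  else
    let r := pypowmod (b * b % m) (e / 2) m
    if e % 2 = 1 then r * (b % m) % m else r
decreasing_by exact Nat.div_lt_self (Nat.pos_of_ne_zero h) (by norm_num)

-- Literal transliteration of A.  Python's three-argument pow(b, e, M) with M > 0 is b^e % M.
-- The final 'raise ValueError' (unreachable for k ≥ 1) is modelled by returning 0; k ≤ 0 raises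
-- TypeError in Python (float exponent) and is excluded by Pre_.
def primitive_root_mod_3k (k : Int) : Int :=
  let M : Int := 3 ^ k.toNat
  let phi : Int := 2 * 3 ^ (k - 1).toNat
  if pypowmod 2 phi.toNat M == 1 &&
     !([2, 3, PySem.Int.floordiv phi 2, PySem.Int.floordiv phi 3].any
         (fun d => decide (0 < d) && decide (d < phi) && (pypowmod 2 d.toNat M == 1))) then
    2
  else
    match (PySem.List.pyRange 2 M 1).find? (fun g =>
        pypowmod g phi.toNat M == 1 &&
        (PySem.List.pyRange 1 phi 1).all (fun d =>
          !(PySem.Int.mod phi d == 0 && pypowmod g d.toNat M == 1))) with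
    | some g => g
    | none => 0   -- Python: raise ValueError (unreachable inside Pre_)

-- ===== PORT B =====
def primitive_root_mod_3k_alt (k : Int) : Int := 2

-- ===== PRECONDITION & SPEC =====
-- Pre_ excludes k ≤ 0, where the Python A raises TypeError (3**(k-1) is a float there).
def Pre_primitive_root_mod_3k (k : Int) : Prop := 1 ≤ k
instance (k : Int) : Decidable (Pre_primitive_root_mod_3k k) := by unfold Pre_primitive_root_mod_3k; infer_instance
def pvWitness_primitive_root_mod_3k : Int := 2

def Spec_primitive_root_mod_3k (k : Int) (out : Int) : Prop := out = primitive_root_mod_3k_alt k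
instance (k : Int) (out : Int) : Decidable (Spec_primitive_root_mod_3k k out) := by unfold Spec_primitive_root_mod_3k; infer_instance

-- ===== CLAIM (what is proved, stated in full; the proofs are below) =====
def Claim_equal_primitive_root_mod_3k : Prop := ∀ (k : Int), Dom_primitive_root_mod_3k k → Pre_primitive_root_mod_3k k → Spec_primitive_root_mod_3k k (primitive_root_mod_3k k)

-- ===== LEMMAS AND PROOFS =====

theorem pypowmod_eq (b : Int) (e : Nat) (m : Int) : pypowmod b e m = b ^ e % m := by
  induction e using Nat.strong_induction_on generalizing b with
  | _ e ih =>
    rw [pypowmod]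
    by_cases h0 : e = 0
    · simp [h0]
    · have hlt : e / 2 < e := Nat.div_lt_self (Nat.pos_of_ne_zero h0) (by norm_num)
      rw [dif_neg h0]
      have hr : pypowmod (b * b % m) (e / 2) m = b ^ (2 * (e / 2)) % m := by
        rw [ih (e / 2) hlt]
        have h1 : (b * b % m) ^ (e / 2) % m = (b * b) ^ (e / 2) % m :=
          Int.ModEq.pow _ (Int.emod_emod_of_dvd _ dvd_rfl)
        rw [h1, two_mul, pow_add, ← mul_pow]
      simp only [hr]
      by_cases hp : e % 2 = 1
      · rw [if_pos hp]
        have he : b ^ e = b ^ (2 * (e / 2)) * b := by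
          rw [← pow_succ]
          congr 1
          omega
        rw [he]
        exact (Int.mul_emod _ _ _).symm
      · rw [if_neg hp]
        congr 2
        omega

-- 2^(3^j) ≡ -1 (mod 3^(j+1)), with an explicit cofactor.
theorem two_pow_three_pow (j : ℕ) : ∃ v : ℤ, (2:ℤ) ^ (3 ^ j) = 3 ^ (j + 1) * v - 1 := by
  induction j with
  | zero => exact ⟨1, by norm_num⟩
  | succ j ih =>
    obtain ⟨v, hv⟩ := ih
    refine ⟨3 ^ (2 * j + 1) * v ^ 3 - 3 ^ (j + 1) * v ^ 2 + v, ?_⟩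
    have h3 : (3:ℕ) ^ (j + 1) = 3 ^ j * 3 := by ring
    calc (2:ℤ) ^ 3 ^ (j + 1) = ((2:ℤ) ^ (3 ^ j)) ^ 3 := by rw [h3, pow_mul]
    _ = (3 ^ (j + 1) * v - 1) ^ 3 := by rw [hv]
    _ = 3 ^ (j + 1 + 1) * (3 ^ (2 * j + 1) * v ^ 3 - 3 ^ (j + 1) * v ^ 2 + v) - 1 := by ring

-- 2^(2·3^j) ≡ 1 + 3^(j+1) (mod 3^(j+2)), with an explicit cofactor.
theorem four_pow_three_pow (j : ℕ) :
    ∃ t : ℤ, (2:ℤ) ^ (2 * 3 ^ j) = 1 + 3 ^ (j + 1) + 3 ^ (j + 2) * t := by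
  induction j with
  | zero => exact ⟨0, by norm_num⟩
  | succ j ih =>
    obtain ⟨t, ht⟩ := ih
    have h3 : 2 * 3 ^ (j + 1) = (2 * 3 ^ j) * 3 := by ring
    refine ⟨t + 3 ^ j * (1 + 3 * t) ^ 2 + 3 ^ (2 * j) * (1 + 3 * t) ^ 3, ?_⟩
    calc (2:ℤ) ^ (2 * 3 ^ (j + 1)) = ((2:ℤ) ^ (2 * 3 ^ j)) ^ 3 := by rw [h3, pow_mul]
    _ = (1 + 3 ^ (j + 1) + 3 ^ (j + 2) * t) ^ 3 := by rw [ht]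
    _ = 1 + 3 ^ (j + 1 + 1) + 3 ^ (j + 1 + 2) *
          (t + 3 ^ j * (1 + 3 * t) ^ 2 + 3 ^ (2 * j) * (1 + 3 * t) ^ 3) := by ring

theorem emod_of_form {M c r : ℤ} (hr0 : 0 ≤ r) (hrM : r < M) : (M * c + r) % M = r := by
  rw [add_comm, Int.add_mul_emod_self_left]
  exact Int.emod_eq_of_lt hr0 hrM

-- The main computation: for every n ≥ 1, A's quick path fires and returns 2.
theorem portA_eq_two (n : ℕ) (hn : 1 ≤ n) : primitive_root_mod_3k (n : ℤ) = 2 := by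
  have hkt : ((n : ℤ)).toNat = n := Int.toNat_natCast n
  have hk1t : ((n : ℤ) - 1).toNat = n - 1 := by omega
  have hMpos : (1:ℤ) < 3 ^ n := by
    calc (1:ℤ) < 3 ^ 1 := by norm_num
    _ ≤ 3 ^ n := pow_le_pow_right₀ (by norm_num) hn
  have hphi : ((2 * 3 ^ (n - 1) : ℤ)).toNat = 2 * 3 ^ (n - 1) := by
    rw [show (2 * 3 ^ (n - 1) : ℤ) = ((2 * 3 ^ (n - 1) : ℕ) : ℤ) by push_cast; ring,
      Int.toNat_natCast]
  simp only [primitive_root_mod_3k, pypowmod_eq]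
  obtain ⟨v, hv⟩ := two_pow_three_pow (n - 1)
  have hn1 : n - 1 + 1 = n := by omega
  rw [hn1] at hv
  have ha : (2:ℤ) ^ (2 * 3 ^ (n - 1)) % 3 ^ n = 1 := by
    have h : (2:ℤ) ^ (2 * 3 ^ (n - 1)) = 3 ^ n * (3 ^ n * v ^ 2 - 2 * v) + 1 := by
      rw [two_mul, pow_add, hv]; ring
    rw [h, emod_of_form (by norm_num) hMpos]
  have hd3 : (2:ℤ) ^ (3 ^ (n - 1)) % 3 ^ n = 3 ^ n - 1 := by
    have h : (2:ℤ) ^ (3 ^ (n - 1)) = 3 ^ n * (v - 1) + (3 ^ n - 1) := by rw [hv]; ring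
    rw [h, emod_of_form (by omega) (by omega)]
  have hfd2 : PySem.Int.floordiv (2 * 3 ^ (n - 1) : ℤ) 2 = (3:ℤ) ^ (n - 1) := by
    rw [PySem.Int.floordiv_eq_ediv_of_pos (by norm_num)]
    omega
  have h3pos : (0:ℤ) < 3 ^ (n - 1) := by positivity
  by_cases h1 : n = 1
  · subst h1; decide
  · have hn2 : 2 ≤ n := by omega
    have hmul : (3:ℤ) ^ n = 3 ^ (n - 1) * 3 := by
      conv_lhs => rw [← hn1]
      rw [pow_succ]
    have hsplit : n - 1 = n - 2 + 1 := by omega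
    have h3pos2 : (0:ℤ) < 3 ^ (n - 2) := by positivity
    have hmul2 : (3:ℤ) ^ (n - 1) = 3 ^ (n - 2) * 3 := by
      conv_lhs => rw [hsplit]
      rw [pow_succ]
    have hfd3 : PySem.Int.floordiv (2 * 3 ^ (n - 1) : ℤ) 3 = 2 * (3:ℤ) ^ (n - 2) := by
      rw [PySem.Int.floordiv_eq_ediv_of_pos (by norm_num), hmul2]
      omega
    obtain ⟨t, ht⟩ := four_pow_three_pow (n - 2)
    rw [show n - 2 + 1 = n - 1 by omega, show n - 2 + 2 = n by omega] at ht
    have hd4 : (2:ℤ) ^ (2 * 3 ^ (n - 2)) % 3 ^ n = 1 + 3 ^ (n - 1) := by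
      have h : (2:ℤ) ^ (2 * 3 ^ (n - 2)) = 3 ^ n * t + (1 + 3 ^ (n - 1)) := by rw [ht]; ring
      rw [h, emod_of_form (by positivity) (by omega)]
    have h9 : (9:ℤ) ≤ 3 ^ n := by
      calc (9:ℤ) = 3 ^ 2 := by norm_num
      _ ≤ 3 ^ n := pow_le_pow_right₀ (by norm_num) hn2
    have h4 : (4:ℤ) % 3 ^ n = 4 := Int.emod_eq_of_lt (by norm_num) (by omega)
    have h8 : (8:ℤ) % 3 ^ n = 8 := Int.emod_eq_of_lt (by norm_num) (by omega)
    have ht2 : ((2:ℤ)).toNat = 2 := rfl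
    have ht3 : ((3:ℤ)).toNat = 3 := rfl
    have htp : ((3:ℤ) ^ (n - 1)).toNat = 3 ^ (n - 1) := by
      rw [show ((3:ℤ) ^ (n - 1)) = ((3 ^ (n - 1) : ℕ) : ℤ) by push_cast; ring, Int.toNat_natCast]
    have htp2 : ((2 * (3:ℤ) ^ (n - 2))).toNat = 2 * 3 ^ (n - 2) := by
      rw [show (2 * (3:ℤ) ^ (n - 2)) = ((2 * 3 ^ (n - 2) : ℕ) : ℤ) by push_cast; ring,
        Int.toNat_natCast]
    simp only [hkt, hk1t, hfd2, hfd3, List.any_cons, List.any_nil,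
      hphi, ht2, ht3, htp, htp2, ha, hd3, hd4]
    norm_num
    omega
-- ===== VERDICT (by name: the statement is the Claim_ definition above) =====
theorem primitive_root_mod_3k_spec : Claim_equal_primitive_root_mod_3k := by
  intro k _ hk
  have hk1 : (1:Int) ≤ k := hk
  have hn : k = ((k.toNat : ℕ) : ℤ) := by omega
  have h1 : 1 ≤ k.toNat := by omega
  show primitive_root_mod_3k k = primitive_root_mod_3k_alt k
  rw [hn, portA_eq_two k.toNat h1]
  rfl
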